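-- pv_equiv track=rewrite | github.com/gourav-sharma1857/cipher-spry-backend | patterns.py | alphabet_reflect_by_position
-- ===== SOURCE A (Python) =====
-- MOD_26 = 26 # Constant for modulo 26, used for wrapping around the alphabet (A-Z)
--
-- ASCII_A_UPPER = ord('A') # ASCII value of 'A' (65), used as a base for character-to-index conversion
--
-- def alphabet_reflect_by_position(word: str) -> str: # Pattern: reflects letters at odd positions (1-based)
--     transformed = [] # Initialize an empty list
--     for i, char in enumerate(word): # Iterate through characters with their 0-based index
--         if (i + 1) % 2 != 0: # Check if the 1-based position is odd
--             if 'A' <= char <= 'Z': # Check if it's an uppercase letter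
--                 # Calculate reflected index
--                 transformed.append(chr(ASCII_A_UPPER + (MOD_26 - 1 - (ord(char) - ASCII_A_UPPER))))
--             else: # If not a letter, append unchanged
--                 transformed.append(char)
--         else: # If the 1-based position is even, append unchanged
--             transformed.append(char)
--     return "".join(transformed) # Join the list of characters
-- ===== SOURCE B (Python) =====
-- _TABLE = str.maketrans({chr(c): chr(155 - c) for c in range(ord('A'), ord('Z') + 1)})
--
-- def alphabet_reflect_by_position(word: str) -> str:
--     odds = word[::2].translate(_TABLE)   # 1-based odd positions, uppercase reflected
--     evens = word[1::2]                   # even positions, unchanged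
--     out = []
--     for r, e in zip(odds, evens):
--         out.append(r)
--         out.append(e)
--     if len(odds) > len(evens):
--         out.append(odds[len(evens)])
--     return "".join(out)
-- ===== Notes on version B (the rewrite author's own statement) =====
-- stated objective: faster
-- what changed: Replaces the per-character index-parity loop with a precomputed str.maketrans reflection table applied to the odd-position stride word[::2], interleaved with the untouched even stride word[1::2].
import Mathlib
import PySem

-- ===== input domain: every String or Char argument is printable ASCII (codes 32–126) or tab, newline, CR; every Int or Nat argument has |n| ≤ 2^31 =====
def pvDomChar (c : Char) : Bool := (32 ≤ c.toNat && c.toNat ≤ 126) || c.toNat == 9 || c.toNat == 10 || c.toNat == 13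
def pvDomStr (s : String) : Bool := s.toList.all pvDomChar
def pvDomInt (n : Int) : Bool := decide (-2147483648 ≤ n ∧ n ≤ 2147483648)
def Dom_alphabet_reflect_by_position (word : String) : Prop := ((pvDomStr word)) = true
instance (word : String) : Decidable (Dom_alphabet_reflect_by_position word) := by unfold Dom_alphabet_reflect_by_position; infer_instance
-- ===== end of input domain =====

-- B replaces A's index-parity loop by a translation table applied to the word[::2] stride,
-- interleaved with the untouched word[1::2] stride (idiomatic; same O(n) cost).

-- ===== PORT A =====
def alphabet_reflect_by_position (word : String) : String :=
  let transformed : List Char :=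
    (PySem.List.enumerate word.toList).foldl
      (fun acc ic =>
        if PySem.Int.mod (ic.1 + 1) 2 ≠ 0 then
          if 'A' ≤ ic.2 ∧ ic.2 ≤ 'Z' then
            acc ++ [Char.ofNat (65 + (26 - 1 - (ic.2.toNat - 65)))]
          else acc ++ [ic.2]
        else acc ++ [ic.2])
      []
  String.mk transformed

-- ===== PORT B =====
-- word[::2] / word[1::2]: step-2 stride (PySem.List.slice has no step, ported by hand; exact)
def bStride2 : List Char → List Char
  | [] => []
  | [c] => [c]
  | c :: _ :: r => c :: bStride2 r

-- translate with the maketrans table {C ↦ chr(155-ord(C)) for C in 'A'..'Z'}: uppercase is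
-- reflected, every other char is left unchanged (exact port of translate with that table)
def bReflect (c : Char) : Char :=
  if 'A' ≤ c ∧ c ≤ 'Z' then Char.ofNat (155 - c.toNat) else c

def alphabet_reflect_by_position_alt (word : String) : String :=
  let odds := (bStride2 word.toList).map bReflect
  let evens := bStride2 word.toList.tail
  let out := (odds.zip evens).foldl (fun acc re => acc ++ [re.1, re.2]) []
  String.mk (out ++ (if evens.length < odds.length then [odds.getD evens.length ' '] else []))

-- ===== PRECONDITION & SPEC =====
def Spec_alphabet_reflect_by_position (word : String) (out : String) : Prop := out = alphabet_reflect_by_position_alt word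
instance (word : String) (out : String) : Decidable (Spec_alphabet_reflect_by_position word out) := by unfold Spec_alphabet_reflect_by_position; infer_instance

-- ===== CLAIM (what is proved, stated in full; the proofs are below) =====
def Claim_equal_alphabet_reflect_by_position : Prop := ∀ (word : String), Dom_alphabet_reflect_by_position word → Spec_alphabet_reflect_by_position word (alphabet_reflect_by_position word)

-- ===== LEMMAS AND PROOFS =====

-- common two-step characterisation of both ports
def g : List Char → List Char
  | [] => []
  | [c] => [bReflect c]
  | c1 :: c2 :: r => bReflect c1 :: c2 :: g r

theorem reflA_eq (c : Char) :
    (if 'A' ≤ c ∧ c ≤ 'Z' then Char.ofNat (65 + (25 - (c.toNat - 65))) else c) = bReflect c := by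
  unfold bReflect
  split_ifs with h
  · rcases h with ⟨h1, h2⟩
    simp [Char.le_def, UInt32.le_iff_toNat_le] at h1 h2
    congr 1
    omega
  · rfl

theorem a_map (l : List Char) : ∀ (s : Int), s % 2 = 0 →
    (PySem.List.enumerate l s).map
      (fun ic => if PySem.Int.mod (ic.1 + 1) 2 ≠ 0 then
          (if 'A' ≤ ic.2 ∧ ic.2 ≤ 'Z' then Char.ofNat (65 + (26 - 1 - (ic.2.toNat - 65))) else ic.2)
        else ic.2) = g l := by
  induction l using g.induct with
  | case1 => intro s _; simp [PySem.List.enumerate_nil, g]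
  | case2 c =>
    intro s hs
    have hm : (s + 1).fmod 2 = 1 := by rw [Int.fmod_eq_emod]; norm_num; omega
    simp [PySem.List.enumerate_cons, PySem.List.enumerate_nil, g, PySem.Int.mod, hm, reflA_eq]
  | case3 c1 c2 r ih =>
    intro s hs
    have hm1 : (s + 1).fmod 2 = 1 := by rw [Int.fmod_eq_emod]; norm_num; omega
    have hm2 : (s + 1 + 1).fmod 2 = 0 := by rw [Int.fmod_eq_emod]; norm_num; omega
    have ih' := ih (s + 1 + 1) (by omega)
    simp [PySem.List.enumerate_cons, g, PySem.Int.mod, hm1, hm2, reflA_eq]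
    simpa [PySem.Int.mod, reflA_eq] using ih'

theorem stride2_cons (x : Char) (xs : List Char) :
    bStride2 (x :: xs) = x :: bStride2 xs.tail := by
  cases xs <;> simp [bStride2]

theorem b_eq_g (l : List Char) :
    (let odds := (bStride2 l).map bReflect
     let evens := bStride2 l.tail
     ((odds.zip evens).foldl (fun acc re => acc ++ [re.1, re.2]) []) ++
       (if evens.length < odds.length then [odds.getD evens.length ' '] else [])) = g l := by
  induction l using g.induct with
  | case1 => simp [bStride2, g]
  | case2 c => simp [bStride2, g, List.getD]
  | case3 c1 c2 r ih =>
    have h1 : bStride2 (c1 :: c2 :: r) = c1 :: bStride2 r := by simp [bStride2]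
    have h2 : bStride2 (c2 :: r) = c2 :: bStride2 r.tail := stride2_cons c2 r
    simp only [List.tail_cons, h1, h2, List.map_cons, List.zip_cons_cons] at *
    rw [PySem.List.foldl_append_eq_flatMap] at *
    simp only [List.flatMap_cons, g, List.length_cons]
    by_cases hc : (bStride2 r.tail).length < ((bStride2 r).map bReflect).length
    · have hc' : (bStride2 r.tail).length + 1 < ((bStride2 r).map bReflect).length + 1 := by omega
      simp only [if_pos hc, if_pos hc', List.getD_cons_succ] at *
      simpa using ih
    · have hc' : ¬ ((bStride2 r.tail).length + 1 < ((bStride2 r).map bReflect).length + 1) := by omega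
      simp only [if_neg hc, if_neg hc'] at *
      simpa using ih

-- ===== VERDICT (by name: the statement is the Claim_ definition above) =====
theorem alphabet_reflect_by_position_spec : Claim_equal_alphabet_reflect_by_position := by
  intro word _
  unfold Spec_alphabet_reflect_by_position alphabet_reflect_by_position alphabet_reflect_by_position_alt
  have hfun : (fun (acc : List Char) (ic : Int × Char) =>
      if PySem.Int.mod (ic.1 + 1) 2 ≠ 0 then
        if 'A' ≤ ic.2 ∧ ic.2 ≤ 'Z' then acc ++ [Char.ofNat (65 + (26 - 1 - (ic.2.toNat - 65)))]
        else acc ++ [ic.2]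
      else acc ++ [ic.2]) =
      (fun acc ic => acc ++ [if PySem.Int.mod (ic.1 + 1) 2 ≠ 0 then
        (if 'A' ≤ ic.2 ∧ ic.2 ≤ 'Z' then Char.ofNat (65 + (26 - 1 - (ic.2.toNat - 65))) else ic.2)
        else ic.2]) := by
    funext acc ic; split_ifs <;> rfl
  rw [hfun, PySem.List.foldl_append_singleton_eq_map, a_map word.toList 0 (by norm_num),
    ← b_eq_g word.toList]
  rfl
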